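-- pv_equiv track=rewrite | github.com/siqiyyyy/CM_Kintex_FW | xml_regmap/node.py | getBitRange
-- ===== SOURCE A (Python) =====
-- def getBitRange(mask):
--     bits = bin(mask)[2:].zfill(32)[::-1]
--     start = -1
--     end = -1
--     for i in range(len(bits)-1,-1,-1):
--         if start == -1:
--             if bits[i] == '1':
--                 start = i
--         elif end == -1:
--             if bits[i] == '0' :
--                 end = i+1
--                 break
--     if end == -1:
--         end = 0
--     if start == end:
--         return str(start).rjust(2)
--     else:
--         return str(start).rjust(2,' ') +" downto "+str(end).rjust(2,' ')
-- ===== SOURCE B (Python) =====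
-- def getBitRange(mask):
--     bits = bin(mask)[2:].zfill(32)[::-1]
--     # single forward pass: remember the last '0' seen; each '1' becomes the
--     # current start and freezes end at (last '0' below it) + 1
--     last0 = -1
--     start = -1
--     end = 0
--     for i, c in enumerate(bits):
--         if c == '1':
--             start = i
--             end = last0 + 1
--         elif c == '0':
--             last0 = i
--     if start == end:
--         return str(start).rjust(2)
--     return str(start).rjust(2, ' ') + " downto " + str(end).rjust(2, ' ')
-- ===== Notes on version B (the rewrite author's own statement) =====
-- stated objective: simpler
-- what changed: A scans the reversed bit string backwards in two phases (find the top set bit, then break on the first clear bit below it, plus a post-loop fixup); B makes one forward pass that remembers the most recent clear bit and, at each set bit, updates start and freezes end just above that clear bit, needing no break or fixup.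
import Mathlib
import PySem

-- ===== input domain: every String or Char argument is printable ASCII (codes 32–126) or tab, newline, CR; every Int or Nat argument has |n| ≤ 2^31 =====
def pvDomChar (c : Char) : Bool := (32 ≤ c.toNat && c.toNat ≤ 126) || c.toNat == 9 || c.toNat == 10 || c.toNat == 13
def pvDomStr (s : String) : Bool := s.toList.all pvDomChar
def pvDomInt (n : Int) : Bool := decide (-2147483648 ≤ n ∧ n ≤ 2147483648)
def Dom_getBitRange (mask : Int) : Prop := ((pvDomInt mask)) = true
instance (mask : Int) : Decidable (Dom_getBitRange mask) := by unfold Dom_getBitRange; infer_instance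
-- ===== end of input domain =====

-- B replaces A's backward two-phase scan (find top '1', then break on the first '0'
-- below it) with a single forward pass that tracks the last '0' seen; objective: simpler.


-- shared helper: bits = bin(mask)[2:].zfill(32)[::-1]  (identical line in A and B;
-- [::-1] is List.reverse by PySem.List.slice?_none_none_neg_one)
def pvBits (mask : Int) : List Char :=
  (PySem.Chars.zfill (PySem.List.slice (PySem.Int.toBinChars0b mask) (some 2) none) 32).reverse

-- shared helper: s.rjust(w, ' ') — hand port, exact: left-pad with fill up to width w
def pvRjust (s : List Char) (w : Nat) (fill : Char) : List Char :=
  List.replicate (w - s.length) fill ++ s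

-- ===== PORT A =====
-- A's loop 'for i in range(len(bits)-1,-1,-1)' with its break, as recursion on k = i+1
def aLoop (bits : List Char) : Nat → Int → Int → Int × Int
  | 0, start, e => (start, e)
  | k+1, start, e =>
    if start = -1 then
      if bits.getD k ' ' = '1' then aLoop bits k (k : Int) e
      else aLoop bits k start e
    else if e = -1 then
      if bits.getD k ' ' = '0' then (start, (k : Int) + 1)   -- break
      else aLoop bits k start e
    else aLoop bits k start e

def getBitRange (mask : Int) : String :=
  let bits := pvBits mask
  let p := aLoop bits bits.length (-1) (-1)
  let start := p.1
  let e : Int := if p.2 = -1 then 0 else p.2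
  if start = e then String.mk (pvRjust (PySem.Int.toChars start) 2 ' ')
  else String.mk (pvRjust (PySem.Int.toChars start) 2 ' ' ++ (" downto ").toList
                  ++ pvRjust (PySem.Int.toChars e) 2 ' ')

-- ===== PORT B =====
-- B's loop body for one (i, c)
def bStep (st : Int × Int × Int) (i : Int) (c : Char) : Int × Int × Int :=
  if c = '1' then (st.1, i, st.1 + 1)
  else if c = '0' then (i, st.2.1, st.2.2)
  else st

-- B's 'for i, c in enumerate(bits)' over state (last0, start, end)
def bLoop : List Char → Int → Int × Int × Int → Int × Int × Int
  | [], _, st => st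
  | c :: cs, i, st => bLoop cs (i + 1) (bStep st i c)

def getBitRange_alt (mask : Int) : String :=
  let bits := pvBits mask
  let st := bLoop bits 0 (-1, -1, 0)
  let start := st.2.1
  let e := st.2.2
  if start = e then String.mk (pvRjust (PySem.Int.toChars start) 2 ' ')
  else String.mk (pvRjust (PySem.Int.toChars start) 2 ' ' ++ (" downto ").toList
                  ++ pvRjust (PySem.Int.toChars e) 2 ' ')

-- ===== PRECONDITION & SPEC =====
def Spec_getBitRange (mask : Int) (out : String) : Prop := out = getBitRange_alt mask
instance (mask : Int) (out : String) : Decidable (Spec_getBitRange mask out) := by unfold Spec_getBitRange; infer_instance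

-- ===== CLAIM (what is proved, stated in full; the proofs are below) =====
def Claim_equal_getBitRange : Prop := ∀ (mask : Int), Dom_getBitRange mask → Spec_getBitRange mask (getBitRange mask)

-- ===== LEMMAS AND PROOFS =====

-- A's phase-2 scan (start set, looking for a '0' from index k-1 downward)
def gScan (bits : List Char) : Nat → Int
  | 0 => -1
  | k+1 => if bits.getD k ' ' = '0' then (k : Int) + 1 else gScan bits k

theorem aLoop_congr (b b' : List Char) (k : Nat) (s e : Int)
    (h : ∀ j, j < k → b.getD j ' ' = b'.getD j ' ') :
    aLoop b k s e = aLoop b' k s e := by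
  induction k generalizing s e with
  | zero => rfl
  | succ k ih =>
    have hk := h k (Nat.lt_succ_self k)
    have h' : ∀ j, j < k → b.getD j ' ' = b'.getD j ' ' :=
      fun j hj => h j (Nat.lt_succ_of_lt hj)
    simp only [aLoop, hk]
    split_ifs <;> first | rfl | exact ih _ _ h'

theorem aLoop_phase2 (bits : List Char) (k : Nat) (s : Int) (hs : s ≠ -1) :
    aLoop bits k s (-1) = (s, gScan bits k) := by
  induction k with
  | zero => rfl
  | succ k ih =>
    have hstep : aLoop bits (k+1) s (-1)
        = if bits.getD k ' ' = '0' then (s, (k : Int) + 1) else aLoop bits k s (-1) := by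
      simp [aLoop, hs]
    rw [hstep]
    unfold gScan
    split_ifs with h <;> simp [ih]

theorem getD_snoc_lt (l : List Char) (c : Char) (j : Nat) (hj : j < l.length) :
    (l ++ [c]).getD j ' ' = l.getD j ' ' := by
  simp [List.getD, List.getElem?_append_left hj]

theorem getD_snoc_self (l : List Char) (c : Char) :
    (l ++ [c]).getD l.length ' ' = c := by
  simp [List.getD]

theorem gScan_snoc_lt (l : List Char) (c : Char) (k : Nat) (hk : k ≤ l.length) :
    gScan (l ++ [c]) k = gScan l k := by
  induction k with
  | zero => rfl
  | succ k ih =>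
    have h := getD_snoc_lt l c k (by omega)
    simp only [gScan, h]
    split_ifs <;> simp [ih (by omega)]

theorem bLoop_snoc (l : List Char) (c : Char) (i : Int) (st : Int × Int × Int) :
    bLoop (l ++ [c]) i st = bStep (bLoop l i st) (i + l.length) c := by
  induction l generalizing i st with
  | nil => simp [bLoop]
  | cons x xs ih =>
    simp only [List.cons_append, bLoop, ih]
    congr 1
    simp only [List.length_cons]
    push_cast
    omega

-- A's final (start, end) after the post-loop fixup
def resA (l : List Char) : Int × Int :=
  let p := aLoop l l.length (-1) (-1)
  (p.1, if p.2 = -1 then 0 else p.2)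

-- B's final (start, end)
def resB (l : List Char) : Int × Int :=
  let st := bLoop l 0 (-1, -1, 0)
  (st.2.1, st.2.2)

theorem main_invariant (l : List Char) :
    resA l = resB l ∧
    gScan l l.length =
      (if (bLoop l 0 (-1, -1, 0)).1 = -1 then -1 else (bLoop l 0 (-1, -1, 0)).1 + 1) ∧
    (-1 : Int) ≤ (bLoop l 0 (-1, -1, 0)).1 := by
  induction l using List.reverseRecOn with
  | nil => exact ⟨rfl, rfl, by simp [bLoop]⟩
  | append_singleton l c ih =>
    obtain ⟨ih1, ih2, ih3⟩ := ih
    have hB : bLoop (l ++ [c]) 0 (-1, -1, 0)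
        = bStep (bLoop l 0 (-1, -1, 0)) (l.length : Int) c := by
      have := bLoop_snoc l c 0 (-1, -1, 0)
      simpa using this
    have hlen : (l ++ [c]).length = l.length + 1 := by simp
    have hgsnoc : gScan (l ++ [c]) l.length = gScan l l.length :=
      gScan_snoc_lt l c l.length le_rfl
    have hself := getD_snoc_self l c
    -- unfold one step of A's loop at index l.length
    have hA1 : aLoop (l ++ [c]) (l.length + 1) (-1) (-1)
        = (if c = '1' then aLoop (l ++ [c]) l.length (l.length : Int) (-1)
           else aLoop (l ++ [c]) l.length (-1) (-1)) := by
      simp [aLoop, hself]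
    by_cases hc1 : c = '1'
    · -- start := len; phase 2 over l
      have hs : ((l.length : Int)) ≠ -1 := by omega
      have hA2 : aLoop (l ++ [c]) l.length (l.length : Int) (-1)
          = ((l.length : Int), gScan (l ++ [c]) l.length) :=
        aLoop_phase2 _ _ _ hs
      have hresA : resA (l ++ [c])
          = ((l.length : Int), if gScan l l.length = -1 then 0 else gScan l l.length) := by
        simp only [resA, hlen, hA1, if_pos hc1, hA2, hgsnoc]
      have hresB : resB (l ++ [c])
          = ((l.length : Int), (bLoop l 0 (-1, -1, 0)).1 + 1) := by
        simp only [resB]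
        rw [hB]
        simp [bStep, hc1]
      constructor
      · rw [hresA, hresB]
        by_cases hz : (bLoop l 0 (-1, -1, 0)).1 = -1
        · simp [ih2, hz]
        · have h0 : (0 : Int) ≤ (bLoop l 0 (-1, -1, 0)).1 := by omega
          rw [ih2, if_neg hz]
          have : (bLoop l 0 (-1, -1, 0)).1 + 1 ≠ -1 := by omega
          simp [this]
      · constructor
        · -- last0 unchanged; gScan gains a non-'0' char
          have : gScan (l ++ [c]) (l.length + 1) = gScan (l ++ [c]) l.length := by
            simp [gScan, hself, hc1]
          rw [hlen, this, hgsnoc, hB]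
          simp [bStep, hc1, ih2]
        · rw [hB]; simp [bStep, hc1]; omega
    · -- c ≠ '1': A's loop over l ++ [c] restricted to indices < l.length = loop over l
      have hA3 : aLoop (l ++ [c]) l.length (-1) (-1) = aLoop l l.length (-1) (-1) :=
        aLoop_congr _ _ _ _ _ (fun j hj => getD_snoc_lt l c j hj)
      have hresA : resA (l ++ [c]) = resA l := by
        simp only [resA, hlen, hA1, if_neg hc1, hA3]
      by_cases hc0 : c = '0'
      · refine ⟨?_, ?_, ?_⟩
        · rw [hresA, ih1]; simp only [resB]; rw [hB]; simp [bStep, hc1, hc0]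
        · have : gScan (l ++ [c]) (l.length + 1) = (l.length : Int) + 1 := by
            simp [gScan, hself, hc0]
          rw [hlen, this, hB]
          have hlz : ((l.length : Int)) ≠ -1 := by omega
          simp [bStep, hc1, hc0, hlz]
        · rw [hB]; simp only [bStep, if_neg hc1, if_pos hc0]; omega
      · refine ⟨?_, ?_, ?_⟩
        · rw [hresA, ih1]; simp only [resB]; rw [hB]; simp [bStep, hc1, hc0]
        · have : gScan (l ++ [c]) (l.length + 1) = gScan (l ++ [c]) l.length := by
            simp [gScan, hself, hc0]
          rw [hlen, this, hgsnoc, hB]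
          simp [bStep, hc1, hc0, ih2]
        · rw [hB]; simp only [bStep, if_neg hc1, if_neg hc0]; exact ih3
  
theorem res_eq (l : List Char) : resA l = resB l := (main_invariant l).1

-- ===== VERDICT (by name: the statement is the Claim_ definition above) =====
theorem getBitRange_spec : Claim_equal_getBitRange := by
  intro mask _
  unfold Spec_getBitRange getBitRange getBitRange_alt
  have h := res_eq (pvBits mask)
  have h1 : (resA (pvBits mask)).1 = (resB (pvBits mask)).1 := by rw [h]
  have h2 : (resA (pvBits mask)).2 = (resB (pvBits mask)).2 := by rw [h]
  simp only [resA, resB] at h1 h2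
  simp only [h1, h2]
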